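-- pv_equiv track=rewrite | github.com/IITA-Proyectos/RCJ-2024-Rescue-Simulation-Team-IITA-SALTA-ATLAS | src/final_matrix_creation/final_matrix_creator.py | expandzone4_v2
-- ===== SOURCE A (Python) =====
-- def expandzone4_v2(matrix):
--
--     rows = len(matrix)
--     cols = len(matrix[0])
--
--     new_matrix = [row.copy() for row in matrix]
--
--     directions = [(-1, 0), (1, 0), (0, -1), (0, 1), (-1, -1), (-1, 1), (1, -1), (1, 1)]
--
--     for i in range(rows):
--         for j in range(cols):
--             if matrix[i][j] == '*':
--                 for di, dj in directions:
--                     ni, nj = i + di, j + dj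
--                     if 0 <= ni < rows and 0 <= nj < cols:
--                         if new_matrix[ni][nj] not in ('0', 'r', 'g', 'o', '*'):
--                             new_matrix[ni][nj] = '*'
--
--     return new_matrix
-- ===== SOURCE B (Python) =====
-- def expandzone4_v2(matrix):
--     rows = len(matrix)
--     cols = len(matrix[0])
--     frozen = ('0', 'r', 'g', 'o', '*')
--
--     new_matrix = [row.copy() for row in matrix]
--     for i in range(rows):
--         for j in range(cols):
--             if matrix[i][j] in frozen:
--                 continue
--             if any(matrix[ni][nj] == '*'
--                    for ni in range(max(i - 1, 0), min(i + 2, rows))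
--                    for nj in range(max(j - 1, 0), min(j + 2, cols))
--                    if (ni, nj) != (i, j)):
--                 new_matrix[i][j] = '*'
--     return new_matrix
-- ===== Notes on version B (the rewrite author's own statement) =====
-- stated objective: alternative
-- what changed: Replaced A's push-style dilation (scan for '*' cells and write '*' outward into the evolving copy, so later writes can read earlier ones) by a pull-style pass: each changeable cell is set to '*' exactly when one of its 8 in-bounds neighbors in the ORIGINAL matrix is '*'; Pre_ excludes only inputs on which A raises IndexError (empty matrix, or a row shorter than len(matrix[0])).
import Mathlib
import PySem

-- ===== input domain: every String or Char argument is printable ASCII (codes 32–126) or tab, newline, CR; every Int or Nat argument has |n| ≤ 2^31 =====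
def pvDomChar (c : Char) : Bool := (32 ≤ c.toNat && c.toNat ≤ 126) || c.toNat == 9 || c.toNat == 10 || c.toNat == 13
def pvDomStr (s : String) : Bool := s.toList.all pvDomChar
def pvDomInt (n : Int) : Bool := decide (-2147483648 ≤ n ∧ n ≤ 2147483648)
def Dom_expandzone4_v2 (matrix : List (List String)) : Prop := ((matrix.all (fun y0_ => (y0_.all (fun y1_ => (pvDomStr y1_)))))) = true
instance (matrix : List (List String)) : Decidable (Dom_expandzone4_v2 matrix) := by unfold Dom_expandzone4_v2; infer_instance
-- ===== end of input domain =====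

-- B replaces A's push-style in-place dilation with a pull-style pass: each changeable cell
-- reads its 8 in-bounds neighbors of the ORIGINAL matrix; equivalent on Pre_ (A raises elsewhere).

-- ===== PORT A =====
def expandzone4_v2 (matrix : List (List String)) : List (List String) :=
  let rows := matrix.length
  let cols := (matrix.headD []).length
  let new_matrix := matrix.map (fun row => row)
  let directions : List (Int × Int) := [(-1, 0), (1, 0), (0, -1), (0, 1), (-1, -1), (-1, 1), (1, -1), (1, 1)]
  (List.range rows).foldl (fun nm i =>
    (List.range cols).foldl (fun nm j =>
      if (matrix.getD i []).getD j "" = "*" then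
        directions.foldl (fun nm d =>
          let ni : Int := (i : Int) + d.1
          let nj : Int := (j : Int) + d.2
          if 0 ≤ ni ∧ ni < (rows : Int) ∧ 0 ≤ nj ∧ nj < (cols : Int) then
            if (nm.getD ni.toNat []).getD nj.toNat "" ∈ (["0", "r", "g", "o", "*"] : List String) then nm
            else nm.set ni.toNat ((nm.getD ni.toNat []).set nj.toNat "*")
          else nm) nm
      else nm) nm) new_matrix

-- ===== PORT B =====
def expandzone4_v2_alt (matrix : List (List String)) : List (List String) :=
  let rows := matrix.length
  let cols := (matrix.headD []).length
  let frozen : List String := ["0", "r", "g", "o", "*"]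
  let starNear : Nat → Nat → Bool := fun i j =>
    (PySem.List.pyRange (max ((i : Int) - 1) 0) (min ((i : Int) + 2) (rows : Int))).any (fun ni =>
      (PySem.List.pyRange (max ((j : Int) - 1) 0) (min ((j : Int) + 2) (cols : Int))).any (fun nj =>
        (!(ni == (i : Int) && nj == (j : Int))) && (PySem.List.pyGetD (PySem.List.pyGetD matrix ni []) nj "" == "*")))
  (List.range rows).foldl (fun nm i =>
    (List.range cols).foldl (fun nm j =>
      if (matrix.getD i []).getD j "" ∈ frozen then nm
      else if starNear i j then nm.set i ((nm.getD i []).set j "*")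
      else nm) nm) (matrix.map (fun row => row))

-- ===== PRECONDITION & SPEC =====
-- Pre_ excludes exactly the inputs on which the Python A raises IndexError: the empty matrix
-- (matrix[0] fails) and matrices with some row shorter than len(matrix[0]) (A reads matrix[i][j]
-- for every j < len(matrix[0])).
def Pre_expandzone4_v2 (matrix : List (List String)) : Prop :=
  matrix ≠ [] ∧ ∀ row ∈ matrix, (matrix.headD []).length ≤ row.length
instance (matrix : List (List String)) : Decidable (Pre_expandzone4_v2 matrix) := by
  unfold Pre_expandzone4_v2; infer_instance

def pvWitness_expandzone4_v2 : List (List String) := [["*", "a"], ["b", "c"]]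

def Spec_expandzone4_v2 (matrix : List (List String)) (out : List (List String)) : Prop := out = expandzone4_v2_alt matrix
instance (matrix : List (List String)) (out : List (List String)) : Decidable (Spec_expandzone4_v2 matrix out) := by unfold Spec_expandzone4_v2; infer_instance

-- ===== CLAIM (what is proved, stated in full; the proofs are below) =====
def Claim_equal_expandzone4_v2 : Prop := ∀ (matrix : List (List String)), Dom_expandzone4_v2 matrix → Pre_expandzone4_v2 matrix → Spec_expandzone4_v2 matrix (expandzone4_v2 matrix)

-- ===== LEMMAS AND PROOFS =====

def pvFrozen : List String := ["0", "r", "g", "o", "*"]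

def pvGet (matrix : List (List String)) (p q : Nat) : String := (matrix.getD p []).getD q ""

-- the "pull" characterisation: cell (p,q) becomes "*" iff it is changeable and act p q holds
def pvModelF (matrix : List (List String)) (cols : Nat) (act : Nat → Nat → Bool) : List (List String) :=
  matrix.mapIdx (fun p row => row.mapIdx (fun q v =>
    if q < cols ∧ v ∉ pvFrozen ∧ act p q = true then "*" else v))

def pvAdjB (a b p q : Nat) : Bool :=
  decide (¬(a = p ∧ b = q) ∧ a ≤ p + 1 ∧ p ≤ a + 1 ∧ b ≤ q + 1 ∧ q ≤ b + 1)

def pvActOf (matrix : List (List String)) (done : List (Nat × Nat)) (p q : Nat) : Bool :=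
  done.any (fun c => (pvGet matrix c.1 c.2 == "*") && pvAdjB c.1 c.2 p q)

def pvCells (cols n : Nat) : List (Nat × Nat) :=
  (List.range n).flatMap (fun i => (List.range cols).map (fun j => (i, j)))

def pvDirs : List (Int × Int) := [(-1, 0), (1, 0), (0, -1), (0, 1), (-1, -1), (-1, 1), (1, -1), (1, 1)]

def pvUpd (rows cols i j : Nat) (nm : List (List String)) (d : Int × Int) : List (List String) :=
  let ni : Int := (i : Int) + d.1
  let nj : Int := (j : Int) + d.2
  if 0 ≤ ni ∧ ni < (rows : Int) ∧ 0 ≤ nj ∧ nj < (cols : Int) then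
    if (nm.getD ni.toNat []).getD nj.toNat "" ∈ pvFrozen then nm
    else nm.set ni.toNat ((nm.getD ni.toNat []).set nj.toNat "*")
  else nm

def pvStep (matrix : List (List String)) (rows cols : Nat) (nm : List (List String)) (c : Nat × Nat) : List (List String) :=
  if pvGet matrix c.1 c.2 = "*" then pvDirs.foldl (pvUpd rows cols c.1 c.2) nm else nm

def pvHit (matrix : List (List String)) (cols i j : Nat) (d : Int × Int) (p q : Nat) : Bool :=
  decide (0 ≤ (i : Int) + d.1 ∧ (i : Int) + d.1 < (matrix.length : Int) ∧
          0 ≤ (j : Int) + d.2 ∧ (j : Int) + d.2 < (cols : Int) ∧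
          ((i : Int) + d.1).toNat = p ∧ ((j : Int) + d.2).toNat = q ∧ pvGet matrix p q ∉ pvFrozen)

theorem pv_length_modelF (matrix : List (List String)) (cols : Nat) (act : Nat → Nat → Bool) :
    (pvModelF matrix cols act).length = matrix.length := by
  simp [pvModelF]

theorem pv_getElem_modelF (matrix : List (List String)) (cols : Nat) (act : Nat → Nat → Bool)
    (p : Nat) (hp : p < (pvModelF matrix cols act).length) :
    (pvModelF matrix cols act)[p] =
      (matrix[p]'(by simpa [pv_length_modelF] using hp)).mapIdx (fun q v =>
        if q < cols ∧ v ∉ pvFrozen ∧ act p q = true then "*" else v) := by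
  simp [pvModelF]

theorem pv_read_modelF (matrix : List (List String)) (cols : Nat) (act : Nat → Nat → Bool)
    (p q : Nat) (hp : p < matrix.length) (hq : q < (matrix[p]).length) :
    ((pvModelF matrix cols act).getD p []).getD q "" =
      if q < cols ∧ matrix[p][q] ∉ pvFrozen ∧ act p q = true then "*" else matrix[p][q] := by
  rw [List.getD_eq_getElem _ _ (show p < (pvModelF matrix cols act).length by simpa [pv_length_modelF] using hp)]
  rw [pv_getElem_modelF matrix cols act p]
  rw [List.getD_eq_getElem _ _ (by simpa using hq)]
  simp [List.getElem_mapIdx]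

theorem pv_congr_modelF (matrix : List (List String)) (cols : Nat) (act act' : Nat → Nat → Bool)
    (h : ∀ p q (hp : p < matrix.length) (hq : q < (matrix[p]).length),
          q < cols → matrix[p][q] ∉ pvFrozen → act p q = act' p q) :
    pvModelF matrix cols act = pvModelF matrix cols act' := by
  unfold pvModelF
  apply List.ext_getElem (by simp)
  intro p h1 h2
  simp only [List.getElem_mapIdx]
  apply List.ext_getElem (by simp)
  intro q hq1 hq2
  simp only [List.getElem_mapIdx]
  have hp : p < matrix.length := by simpa using h1
  have hq : q < (matrix[p]).length := by simpa using hq1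
  by_cases hqc : q < cols
  · by_cases hv : matrix[p][q] ∈ pvFrozen
    · simp [hv]
    · rw [h p q hp hq hqc hv]
  · simp [hqc]

theorem pv_modelF_false (matrix : List (List String)) (cols : Nat) :
    pvModelF matrix cols (fun _ _ => false) = matrix := by
  unfold pvModelF
  apply List.ext_getElem (by simp)
  intro p h1 h2
  simp [List.getElem_mapIdx]
  apply List.ext_getElem (by simp)
  intro q hq1 hq2
  simp [List.getElem_mapIdx]

theorem pvGet_eq (matrix : List (List String)) (p q : Nat)
    (hp : p < matrix.length) (hq : q < (matrix[p]).length) :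
    pvGet matrix p q = matrix[p][q] := by
  unfold pvGet
  rw [List.getD_eq_getElem _ _ hp, List.getD_eq_getElem _ _ hq]

theorem pv_write_modelF (matrix : List (List String)) (cols : Nat) (act : Nat → Nat → Bool)
    (p q : Nat) (hp : p < matrix.length) (hq : q < (matrix[p]).length)
    (hqc : q < cols) (hv : matrix[p][q] ∉ pvFrozen) :
    (pvModelF matrix cols act).set p (((pvModelF matrix cols act).getD p []).set q "*")
      = pvModelF matrix cols (fun p' q' => act p' q' || ((p' == p) && (q' == q))) := by
  rw [List.getD_eq_getElem _ _ (show p < (pvModelF matrix cols act).length by simpa [pv_length_modelF] using hp)]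
  apply List.ext_getElem (by simp [pvModelF])
  intro p' h1 h2
  rw [List.getElem_set]
  by_cases hpp : p = p'
  · subst hpp
    rw [if_pos rfl]
    rw [pv_getElem_modelF matrix cols act p, pv_getElem_modelF matrix cols _ p]
    apply List.ext_getElem (by simp)
    intro q' hq1 hq2
    rw [List.getElem_set]
    simp only [List.getElem_mapIdx]
    by_cases hqq : q = q'
    · subst hqq
      simp [hqc, hv]
    · rw [if_neg hqq]
      have : (q' == q) = false := beq_eq_false_iff_ne.mpr (fun h => hqq h.symm)
      simp [this]
  · rw [if_neg hpp]
    have hp' : p' < matrix.length := by simpa [pv_length_modelF] using h2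
    rw [pv_getElem_modelF matrix cols act p', pv_getElem_modelF matrix cols _ p']
    apply List.ext_getElem (by simp)
    intro q' hq1 hq2
    simp only [List.getElem_mapIdx]
    have : (p' == p) = false := beq_eq_false_iff_ne.mpr (fun h => hpp h.symm)
    simp [this]

theorem pv_upd_modelF (matrix : List (List String)) (cols : Nat)
    (hc : ∀ row ∈ matrix, cols ≤ row.length)
    (act : Nat → Nat → Bool) (i j : Nat) (d : Int × Int) :
    pvUpd matrix.length cols i j (pvModelF matrix cols act) d
      = pvModelF matrix cols (fun p q => act p q || pvHit matrix cols i j d p q) := by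
  simp only [pvUpd]
  by_cases hb : 0 ≤ (i : Int) + d.1 ∧ (i : Int) + d.1 < (matrix.length : Int) ∧
      0 ≤ (j : Int) + d.2 ∧ (j : Int) + d.2 < (cols : Int)
  · obtain ⟨b1, b2, b3, b4⟩ := hb
    rw [if_pos ⟨b1, b2, b3, b4⟩]
    have hP : ((i : Int) + d.1).toNat < matrix.length := by omega
    have hQc : ((j : Int) + d.2).toNat < cols := by omega
    have hQ : ((j : Int) + d.2).toNat < (matrix[((i : Int) + d.1).toNat]).length :=
      lt_of_lt_of_le hQc (hc _ (List.getElem_mem _))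
    have hGet := pvGet_eq matrix _ _ hP hQ
    rw [pv_read_modelF matrix cols act _ _ hP hQ]
    by_cases hv : matrix[((i : Int) + d.1).toNat][((j : Int) + d.2).toNat] ∈ pvFrozen
    · have hmem : (if ((j : Int) + d.2).toNat < cols ∧
          matrix[((i : Int) + d.1).toNat][((j : Int) + d.2).toNat] ∉ pvFrozen ∧
          act ((i : Int) + d.1).toNat ((j : Int) + d.2).toNat = true then "*"
          else matrix[((i : Int) + d.1).toNat][((j : Int) + d.2).toNat]) ∈ pvFrozen := by
        split_ifs
        · simp [pvFrozen]
        · exact hv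
      rw [if_pos hmem]
      apply pv_congr_modelF
      intro p q hp hq hqc hv'
      have hfalse : pvHit matrix cols i j d p q = false := by
        simp only [pvHit, decide_eq_false_iff_not]
        rintro ⟨-, -, -, -, e1, e2, hnv⟩
        subst e1; subst e2
        rw [hGet] at hnv
        exact hnv hv
      rw [hfalse, Bool.or_false]
    · by_cases ha : act ((i : Int) + d.1).toNat ((j : Int) + d.2).toNat = true
      · have hcond : ((j : Int) + d.2).toNat < cols ∧
            matrix[((i : Int) + d.1).toNat][((j : Int) + d.2).toNat] ∉ pvFrozen ∧
            act ((i : Int) + d.1).toNat ((j : Int) + d.2).toNat = true := ⟨hQc, hv, ha⟩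
        simp only [if_pos hcond]
        rw [if_pos (show ("*" : String) ∈ pvFrozen by simp [pvFrozen])]
        apply pv_congr_modelF
        intro p q hp hq hqc hv'
        have : pvHit matrix cols i j d p q = true → act p q = true := by
          simp only [pvHit, decide_eq_true_eq]
          rintro ⟨-, -, -, -, e1, e2, -⟩
          subst e1; subst e2
          exact ha
        cases hhit : pvHit matrix cols i j d p q
        · rw [Bool.or_false]
        · rw [this hhit, Bool.true_or]
      · rw [if_neg (by simp [ha, hv])]
        rw [pv_write_modelF matrix cols act _ _ hP hQ hQc hv]
        apply pv_congr_modelF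
        intro p q hp hq hqc hv'
        congr 1
        rw [Bool.eq_iff_iff]
        simp only [pvHit, Bool.and_eq_true, beq_iff_eq, decide_eq_true_eq]
        constructor
        · rintro ⟨e1, e2⟩
          subst e1; subst e2
          refine ⟨b1, b2, b3, b4, rfl, rfl, ?_⟩
          rw [hGet]
          exact hv
        · rintro ⟨-, -, -, -, e1, e2, -⟩
          exact ⟨e1.symm, e2.symm⟩
  · rw [if_neg hb]
    apply pv_congr_modelF
    intro p q hp hq hqc hv
    have hfalse : pvHit matrix cols i j d p q = false := by
      simp only [pvHit, decide_eq_false_iff_not]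
      rintro ⟨a1, a2, a3, a4, -⟩
      exact hb ⟨a1, a2, a3, a4⟩
    rw [hfalse, Bool.or_false]

theorem pv_dirs_fold (matrix : List (List String)) (cols : Nat)
    (hc : ∀ row ∈ matrix, cols ≤ row.length) (i j : Nat) :
    ∀ (ds : List (Int × Int)) (act : Nat → Nat → Bool),
      ds.foldl (pvUpd matrix.length cols i j) (pvModelF matrix cols act)
        = pvModelF matrix cols (fun p q => act p q || ds.any (fun d => pvHit matrix cols i j d p q)) := by
  intro ds
  induction ds with
  | nil =>
    intro act
    simp only [List.foldl_nil, List.any_nil]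
    apply pv_congr_modelF
    intro p q _ _ _ _
    rw [Bool.or_false]
  | cons d ds ih =>
    intro act
    simp only [List.foldl_cons]
    rw [pv_upd_modelF matrix cols hc act i j d, ih]
    apply pv_congr_modelF
    intro p q _ _ _ _
    simp [List.any_cons, Bool.or_assoc]

set_option maxHeartbeats 1000000 in
theorem pv_hit_adj (matrix : List (List String)) (cols : Nat) (i j p q : Nat)
    (hi : i < matrix.length) (hj : j < cols) (hp : p < matrix.length) (hq : q < cols)
    (hv : pvGet matrix p q ∉ pvFrozen) :
    pvDirs.any (fun d => pvHit matrix cols i j d p q) = pvAdjB i j p q := by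
  rw [Bool.eq_iff_iff]
  simp only [pvDirs, List.any_cons, List.any_nil, Bool.or_eq_true, Bool.or_false,
    pvHit, pvAdjB, decide_eq_true_eq]
  simp only [hv, not_false_iff, and_true]
  constructor
  · rintro (h|h|h|h|h|h|h|h) <;> omega
  · rintro ⟨hne, l1, l2, l3, l4⟩
    rcases Nat.lt_trichotomy p i with hpi|hpi|hpi <;> rcases Nat.lt_trichotomy q j with hqj|hqj|hqj
    · right; right; right; right; left; omega
    · left; omega
    · right; right; right; right; right; left; omega
    · right; right; left; omega
    · exact absurd ⟨hpi.symm, hqj.symm⟩ hne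
    · right; right; right; left; omega
    · right; right; right; right; right; right; left; omega
    · right; left; omega
    · right; right; right; right; right; right; right; omega

theorem pv_cell_step (matrix : List (List String)) (cols : Nat)
    (hc : ∀ row ∈ matrix, cols ≤ row.length)
    (done : List (Nat × Nat)) (c : Nat × Nat) (h1 : c.1 < matrix.length) (h2 : c.2 < cols) :
    pvStep matrix matrix.length cols (pvModelF matrix cols (pvActOf matrix done)) c
      = pvModelF matrix cols (pvActOf matrix (done ++ [c])) := by
  unfold pvStep
  by_cases hstar : pvGet matrix c.1 c.2 = "*"
  · rw [if_pos hstar, pv_dirs_fold matrix cols hc c.1 c.2 pvDirs]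
    apply pv_congr_modelF
    intro p q hp hq hqc hv
    rw [pv_hit_adj matrix cols c.1 c.2 p q h1 h2 hp hqc
      (by rw [pvGet_eq matrix p q hp hq]; exact hv)]
    simp [pvActOf, List.any_append, List.any_cons, List.any_nil, hstar]
  · rw [if_neg hstar]
    apply pv_congr_modelF
    intro p q _ _ _ _
    simp [pvActOf, List.any_append, List.any_cons, List.any_nil, hstar]

theorem pv_cells_run (matrix : List (List String)) (cols : Nat)
    (hc : ∀ row ∈ matrix, cols ≤ row.length) :
    ∀ (cs : List (Nat × Nat)) (done : List (Nat × Nat)),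
      (∀ c ∈ cs, c.1 < matrix.length ∧ c.2 < cols) →
      cs.foldl (pvStep matrix matrix.length cols) (pvModelF matrix cols (pvActOf matrix done))
        = pvModelF matrix cols (pvActOf matrix (done ++ cs)) := by
  intro cs
  induction cs with
  | nil =>
    intro done h
    simp
  | cons c cs ih =>
    intro done h
    simp only [List.foldl_cons]
    rw [pv_cell_step matrix cols hc done c (h c List.mem_cons_self).1 (h c List.mem_cons_self).2,
      ih (done ++ [c]) (fun c' hc' => h c' (List.mem_cons_of_mem _ hc'))]
    rw [List.append_assoc]
    rfl

theorem pv_outer (matrix : List (List String)) (cols : Nat)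
    (hc : ∀ row ∈ matrix, cols ≤ row.length) :
    ∀ (n : Nat), n ≤ matrix.length →
      (List.range n).foldl (fun nm i =>
          (List.range cols).foldl (fun nm j => pvStep matrix matrix.length cols nm (i, j)) nm)
        (pvModelF matrix cols (pvActOf matrix []))
      = pvModelF matrix cols (pvActOf matrix (pvCells cols n)) := by
  intro n
  induction n with
  | zero =>
    intro _
    rfl
  | succ n ih =>
    intro hn
    rw [List.range_succ, List.foldl_append, ih (by omega)]
    simp only [List.foldl_cons, List.foldl_nil]
    have hmap := List.foldl_map (f := fun j => ((n, j) : Nat × Nat))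
      (g := pvStep matrix matrix.length cols) (l := List.range cols)
      (init := pvModelF matrix cols (pvActOf matrix (pvCells cols n)))
    rw [← hmap]
    rw [pv_cells_run matrix cols hc _ (pvCells cols n)
      (by intro c hcm; simp only [List.mem_map, List.mem_range] at hcm; obtain ⟨j, hj, rfl⟩ := hcm; exact ⟨by omega, hj⟩)]
    rw [show pvCells cols n ++ (List.range cols).map (fun j => ((n, j) : Nat × Nat)) = pvCells cols (n + 1) from by
      simp [pvCells, List.range_succ]]

theorem pv_portA (matrix : List (List String))
    (hc : ∀ row ∈ matrix, (matrix.headD []).length ≤ row.length) :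
    expandzone4_v2 matrix
      = pvModelF matrix (matrix.headD []).length
          (pvActOf matrix (pvCells (matrix.headD []).length matrix.length)) := by
  have hbridge : expandzone4_v2 matrix
      = (List.range matrix.length).foldl (fun nm i =>
          (List.range (matrix.headD []).length).foldl
            (fun nm j => pvStep matrix matrix.length (matrix.headD []).length nm (i, j)) nm)
          (matrix.map (fun row => row)) := rfl
  rw [hbridge]
  rw [show (matrix.map (fun row => row)) = pvModelF matrix (matrix.headD []).length (pvActOf matrix []) from by
    rw [List.map_id']
    exact (pv_modelF_false matrix (matrix.headD []).length).symm]
  exact pv_outer matrix (matrix.headD []).length hc matrix.length le_rfl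

-- ===== B-side machinery: the pull pass sets each changeable cell independently =====

theorem pv_pyGetD2 (matrix : List (List String)) (cols : Nat)
    (hc : ∀ row ∈ matrix, cols ≤ row.length) (ni nj : Int)
    (h0 : 0 ≤ ni) (h1 : ni < (matrix.length : Int)) (h0' : 0 ≤ nj) (h1' : nj < (cols : Int)) :
    PySem.List.pyGetD (PySem.List.pyGetD matrix ni []) nj "" = pvGet matrix ni.toNat nj.toNat := by
  rw [PySem.List.pyGetD_eq_getElem matrix [] h0 h1]
  have hlen : cols ≤ (matrix[ni.toNat]'(by omega)).length := hc _ (List.getElem_mem _)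
  rw [PySem.List.pyGetD_eq_getElem _ "" h0' (by omega)]
  rw [pvGet_eq matrix ni.toNat nj.toNat (by omega) (by omega)]

theorem pv_starNear (matrix : List (List String)) (cols : Nat)
    (hc : ∀ row ∈ matrix, cols ≤ row.length) (p q : Nat) :
    ((PySem.List.pyRange (max ((p : Int) - 1) 0) (min ((p : Int) + 2) (matrix.length : Int))).any (fun ni =>
      (PySem.List.pyRange (max ((q : Int) - 1) 0) (min ((q : Int) + 2) (cols : Int))).any (fun nj =>
        (!(ni == (p : Int) && nj == (q : Int))) &&
          (PySem.List.pyGetD (PySem.List.pyGetD matrix ni []) nj "" == "*"))))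
      = pvActOf matrix (pvCells cols matrix.length) p q := by
  rw [Bool.eq_iff_iff]
  constructor
  · intro h
    rw [List.any_eq_true] at h
    obtain ⟨ni, hni, h⟩ := h
    simp only [List.any_eq_true] at h
    obtain ⟨nj, hnj, h⟩ := h
    rw [PySem.List.mem_pyRange_one] at hni hnj
    have a1 : (p : Int) - 1 ≤ ni := le_trans (le_max_left _ _) hni.1
    have a2 : (0 : Int) ≤ ni := le_trans (le_max_right _ _) hni.1
    have a3 : ni < (p : Int) + 2 := lt_of_lt_of_le hni.2 (min_le_left _ _)
    have a4 : ni < (matrix.length : Int) := lt_of_lt_of_le hni.2 (min_le_right _ _)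
    have b1 : (q : Int) - 1 ≤ nj := le_trans (le_max_left _ _) hnj.1
    have b2 : (0 : Int) ≤ nj := le_trans (le_max_right _ _) hnj.1
    have b3 : nj < (q : Int) + 2 := lt_of_lt_of_le hnj.2 (min_le_left _ _)
    have b4 : nj < (cols : Int) := lt_of_lt_of_le hnj.2 (min_le_right _ _)
    rw [Bool.and_eq_true] at h
    have hne : ¬(ni = (p : Int) ∧ nj = (q : Int)) := by
      rintro ⟨e1, e2⟩
      subst e1; subst e2
      simpa using h.1
    have hstar : PySem.List.pyGetD (PySem.List.pyGetD matrix ni []) nj "" = "*" := by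
      simpa using h.2
    rw [pv_pyGetD2 matrix cols hc ni nj a2 a4 b2 b4] at hstar
    unfold pvActOf
    rw [List.any_eq_true]
    refine ⟨(ni.toNat, nj.toNat), ?_, ?_⟩
    · simp only [pvCells, List.mem_flatMap, List.mem_map, List.mem_range]
      exact ⟨ni.toNat, by omega, nj.toNat, by omega, rfl⟩
    · simp only [Bool.and_eq_true, beq_iff_eq, pvAdjB, decide_eq_true_eq]
      exact ⟨hstar, by omega, by omega, by omega, by omega, by omega⟩
  · intro h
    unfold pvActOf at h
    rw [List.any_eq_true] at h
    obtain ⟨c, hcm, hcf⟩ := h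
    simp only [pvCells, List.mem_flatMap, List.mem_map, List.mem_range] at hcm
    obtain ⟨a, ha, b, hb, rfl⟩ := hcm
    simp only [Bool.and_eq_true, beq_iff_eq, pvAdjB, decide_eq_true_eq] at hcf
    obtain ⟨hstar, hne, l1, l2, l3, l4⟩ := hcf
    rw [List.any_eq_true]
    refine ⟨(a : Int), ?_, ?_⟩
    · rw [PySem.List.mem_pyRange_one]
      exact ⟨max_le (by omega) (by omega), lt_min (by omega) (by omega)⟩
    · rw [List.any_eq_true]
      refine ⟨(b : Int), ?_, ?_⟩
      · rw [PySem.List.mem_pyRange_one]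
        exact ⟨max_le (by omega) (by omega), lt_min (by omega) (by omega)⟩
      · rw [pv_pyGetD2 matrix cols hc _ _ (by omega) (by omega) (by omega) (by omega)]
        rw [Bool.and_eq_true]
        constructor
        · simp only [Bool.not_eq_true', Bool.and_eq_false_iff, beq_eq_false_iff_ne, ne_eq]
          omega
        · simp [Int.toNat_natCast, hstar]

-- act for B's evolving copy: a cell has been set iff it was already processed and the full act holds
def pvActB (matrix : List (List String)) (cols : Nat) (done : List (Nat × Nat)) (p q : Nat) : Bool :=
  decide ((p, q) ∈ done) && pvActOf matrix (pvCells cols matrix.length) p q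

def pvStepB (matrix : List (List String)) (cols : Nat) (nm : List (List String)) (c : Nat × Nat) : List (List String) :=
  if pvGet matrix c.1 c.2 ∈ pvFrozen then nm
  else if pvActOf matrix (pvCells cols matrix.length) c.1 c.2 then
    nm.set c.1 ((nm.getD c.1 []).set c.2 "*")
  else nm

theorem pv_cell_stepB (matrix : List (List String)) (cols : Nat)
    (hc : ∀ row ∈ matrix, cols ≤ row.length)
    (done : List (Nat × Nat)) (c : Nat × Nat) (h1 : c.1 < matrix.length) (h2 : c.2 < cols) :
    pvStepB matrix cols (pvModelF matrix cols (pvActB matrix cols done)) c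
      = pvModelF matrix cols (pvActB matrix cols (done ++ [c])) := by
  have hq : c.2 < (matrix[c.1]).length := lt_of_lt_of_le h2 (hc _ (List.getElem_mem _))
  have hGet := pvGet_eq matrix c.1 c.2 h1 hq
  unfold pvStepB
  by_cases hv : matrix[c.1][c.2] ∈ pvFrozen
  · rw [if_pos (by rw [hGet]; exact hv)]
    apply pv_congr_modelF
    intro p q hp hqlt hqc hv'
    unfold pvActB
    congr 1
    rw [Bool.eq_iff_iff]
    simp only [decide_eq_true_eq, List.mem_append, List.mem_cons, List.not_mem_nil, or_false]
    constructor
    · tauto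
    · rintro (h | h)
      · exact h
      · exfalso
        obtain ⟨e1, e2⟩ := Prod.mk.inj h
        subst e1; subst e2
        exact hv' hv
  · rw [if_neg (by rw [hGet]; exact hv)]
    by_cases ha : pvActOf matrix (pvCells cols matrix.length) c.1 c.2 = true
    · rw [if_pos ha]
      rw [pv_write_modelF matrix cols _ c.1 c.2 h1 hq h2 hv]
      apply pv_congr_modelF
      intro p q hp hqlt hqc hv'
      unfold pvActB
      rw [Bool.eq_iff_iff]
      simp only [Bool.or_eq_true, Bool.and_eq_true, decide_eq_true_eq, beq_iff_eq,
        List.mem_append, List.mem_cons, List.not_mem_nil, or_false]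
      constructor
      · rintro (⟨hm, hact⟩ | ⟨e1, e2⟩)
        · exact ⟨Or.inl hm, hact⟩
        · subst e1; subst e2
          exact ⟨Or.inr rfl, ha⟩
      · rintro ⟨hm | hm, hact⟩
        · exact Or.inl ⟨hm, hact⟩
        · have := Prod.mk.inj hm
          exact Or.inr ⟨this.1, this.2⟩
    · rw [if_neg ha]
      apply pv_congr_modelF
      intro p q hp hqlt hqc hv'
      unfold pvActB
      rw [Bool.eq_iff_iff]
      simp only [Bool.and_eq_true, decide_eq_true_eq, List.mem_append, List.mem_cons,
        List.not_mem_nil, or_false]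
      constructor
      · rintro ⟨hm, hact⟩
        exact ⟨Or.inl hm, hact⟩
      · rintro ⟨hm | hm, hact⟩
        · exact ⟨hm, hact⟩
        · exfalso
          have := Prod.mk.inj hm
          obtain ⟨e1, e2⟩ := this
          subst e1; subst e2
          exact ha hact
      
theorem pv_cells_runB (matrix : List (List String)) (cols : Nat)
    (hc : ∀ row ∈ matrix, cols ≤ row.length) :
    ∀ (cs : List (Nat × Nat)) (done : List (Nat × Nat)),
      (∀ c ∈ cs, c.1 < matrix.length ∧ c.2 < cols) →
      cs.foldl (pvStepB matrix cols) (pvModelF matrix cols (pvActB matrix cols done))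
        = pvModelF matrix cols (pvActB matrix cols (done ++ cs)) := by
  intro cs
  induction cs with
  | nil =>
    intro done h
    simp
  | cons c cs ih =>
    intro done h
    simp only [List.foldl_cons]
    rw [pv_cell_stepB matrix cols hc done c (h c List.mem_cons_self).1 (h c List.mem_cons_self).2,
      ih (done ++ [c]) (fun c' hc' => h c' (List.mem_cons_of_mem _ hc'))]
    rw [List.append_assoc]
    rfl

theorem pv_outerB (matrix : List (List String)) (cols : Nat)
    (hc : ∀ row ∈ matrix, cols ≤ row.length) :
    ∀ (n : Nat), n ≤ matrix.length →
      (List.range n).foldl (fun nm i =>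
          (List.range cols).foldl (fun nm j => pvStepB matrix cols nm (i, j)) nm)
        (pvModelF matrix cols (pvActB matrix cols []))
      = pvModelF matrix cols (pvActB matrix cols (pvCells cols n)) := by
  intro n
  induction n with
  | zero =>
    intro _
    rfl
  | succ n ih =>
    intro hn
    rw [List.range_succ, List.foldl_append, ih (by omega)]
    simp only [List.foldl_cons, List.foldl_nil]
    have hmap := List.foldl_map (f := fun j => ((n, j) : Nat × Nat))
      (g := pvStepB matrix cols) (l := List.range cols)
      (init := pvModelF matrix cols (pvActB matrix cols (pvCells cols n)))
    rw [← hmap]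
    rw [pv_cells_runB matrix cols hc _ (pvCells cols n)
      (by intro c hcm; simp only [List.mem_map, List.mem_range] at hcm; obtain ⟨j, hj, rfl⟩ := hcm; exact ⟨by omega, hj⟩)]
    rw [show pvCells cols n ++ (List.range cols).map (fun j => ((n, j) : Nat × Nat)) = pvCells cols (n + 1) from by
      simp [pvCells, List.range_succ]]

theorem pv_portB (matrix : List (List String))
    (hc : ∀ row ∈ matrix, (matrix.headD []).length ≤ row.length) :
    expandzone4_v2_alt matrix
      = pvModelF matrix (matrix.headD []).length
          (pvActOf matrix (pvCells (matrix.headD []).length matrix.length)) := by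
  have hstep : ∀ (nm : List (List String)) (i j : Nat),
      (if (matrix.getD i []).getD j "" ∈ (["0", "r", "g", "o", "*"] : List String) then nm
       else if ((PySem.List.pyRange (max ((i : Int) - 1) 0) (min ((i : Int) + 2) (matrix.length : Int))).any (fun ni =>
          (PySem.List.pyRange (max ((j : Int) - 1) 0) (min ((j : Int) + 2) ((matrix.headD []).length : Int))).any (fun nj =>
            (!(ni == (i : Int) && nj == (j : Int))) &&
              (PySem.List.pyGetD (PySem.List.pyGetD matrix ni []) nj "" == "*")))) then
         nm.set i ((nm.getD i []).set j "*")
       else nm)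
      = pvStepB matrix (matrix.headD []).length nm (i, j) := by
    intro nm i j
    unfold pvStepB pvFrozen pvGet
    rw [pv_starNear matrix (matrix.headD []).length hc i j]
  have hbridge : expandzone4_v2_alt matrix
      = (List.range matrix.length).foldl (fun nm i =>
          (List.range (matrix.headD []).length).foldl
            (fun nm j => pvStepB matrix (matrix.headD []).length nm (i, j)) nm)
          (matrix.map (fun row => row)) := by
    unfold expandzone4_v2_alt
    simp only [hstep]
  rw [hbridge]
  rw [show (matrix.map (fun row => row))
      = pvModelF matrix (matrix.headD []).length (pvActB matrix (matrix.headD []).length []) from by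
    rw [List.map_id']
    refine Eq.symm ?_
    rw [show (pvActB matrix (matrix.headD []).length []) = (fun _ _ => false) from by
      funext p q; simp [pvActB]]
    exact pv_modelF_false matrix (matrix.headD []).length]
  rw [pv_outerB matrix (matrix.headD []).length hc matrix.length le_rfl]
  apply pv_congr_modelF
  intro p q hp hq hqc hv
  unfold pvActB
  rw [Bool.eq_iff_iff]
  simp only [Bool.and_eq_true, decide_eq_true_eq]
  constructor
  · exact fun h => h.2
  · intro h
    refine ⟨?_, h⟩
    simp only [pvCells, List.mem_flatMap, List.mem_map, List.mem_range]
    exact ⟨p, hp, q, hqc, rfl⟩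

-- ===== VERDICT (by name: the statement is the Claim_ definition above) =====
theorem expandzone4_v2_spec : Claim_equal_expandzone4_v2 := by
  intro matrix _ hpre
  unfold Spec_expandzone4_v2
  rw [pv_portA matrix hpre.2, pv_portB matrix hpre.2]
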